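-- pv_equiv track=rewrite | github.com/S1ngularD2ality/eidonic-language-elol | eidonic_language_of_light/00-100_core_glyph_architecture/glyph_052.py | glyph_052
-- ===== SOURCE A (Python) =====
-- from typing import Mapping, List, Sequence
--
-- def glyph_052(text: str, rules: Sequence[Mapping[str, str]]) -> str:
--     """
--     Mirror Cascade Projector — apply a sequence of symmetric mirror maps.
--
--     Overview
--     --------
--     For each mapping in `rules`, enforce involutive symmetry (if a→b but b→a missing,
--     add it), then rewrite `text` using longest-first matching for multi-char keys,
--     falling back to char-wise mirroring.
--
--     Parameters
--     ----------
--     text : str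
--         Input text to transform.
--     rules : Sequence[Mapping[str, str]]
--         One or more mapping dictionaries.
--
--     Returns
--     -------
--     str
--         Transformed text.
--
--     Examples
--     --------
--     >>> glyph_052("<ab>", [{"<": ">", ">": "<"}, {"ab": "ba"}])
--     "><ba<"
--
--     Exceptions
--     ----------
--     (none)
--
--     Complexity
--     ----------
--     - Time  : O(K·|text|·log M)  (K maps; M keys per map; longest-first scan)
--     - Space : O(|text| + M)
--     """
--     out = text
--     for pairs in rules:
--         sym = dict(pairs)
--         for k, v in list(sym.items()):
--             if sym.get(v) != k:
--                 sym[v] = k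
--         keys = sorted(sym.keys(), key=len, reverse=True)
--         i = 0
--         buf: List[str] = []
--         while i < len(out):
--             for k in keys:
--                 if k and out.startswith(k, i):
--                     buf.append(sym[k])
--                     i += len(k)
--                     break
--             else:
--                 ch = out[i]
--                 buf.append(sym.get(ch, ch))
--                 i += 1
--         out = "".join(buf)
--     return out
-- ===== SOURCE B (Python) =====
-- def glyph_052(text, rules):
--     out = text
--     for pairs in rules:
--         sym = dict(pairs)
--         for k, v in list(sym.items()):
--             if sym.get(v) != k:
--                 sym[v] = k
--         maxlen = max(map(len, sym), default=0)
--         buf = []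
--         i, n = 0, len(out)
--         while i < n:
--             L = min(maxlen, n - i)
--             while L > 0:
--                 v = sym.get(out[i:i+L])
--                 if v is not None:
--                     buf.append(v)
--                     i += L
--                     break
--                 L -= 1
--             else:
--                 buf.append(out[i])
--                 i += 1
--         out = "".join(buf)
--     return out
-- ===== Notes on version B (the rewrite author's own statement) =====
-- stated objective: faster
-- what changed: A scans the whole sorted key list at every text position (startswith per key); B instead indexes the symmetrised map by substring and, at each position, tries the possible match lengths longest-first with one hash lookup per length, so the per-position inner scan over all M keys disappears.
import Mathlib
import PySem

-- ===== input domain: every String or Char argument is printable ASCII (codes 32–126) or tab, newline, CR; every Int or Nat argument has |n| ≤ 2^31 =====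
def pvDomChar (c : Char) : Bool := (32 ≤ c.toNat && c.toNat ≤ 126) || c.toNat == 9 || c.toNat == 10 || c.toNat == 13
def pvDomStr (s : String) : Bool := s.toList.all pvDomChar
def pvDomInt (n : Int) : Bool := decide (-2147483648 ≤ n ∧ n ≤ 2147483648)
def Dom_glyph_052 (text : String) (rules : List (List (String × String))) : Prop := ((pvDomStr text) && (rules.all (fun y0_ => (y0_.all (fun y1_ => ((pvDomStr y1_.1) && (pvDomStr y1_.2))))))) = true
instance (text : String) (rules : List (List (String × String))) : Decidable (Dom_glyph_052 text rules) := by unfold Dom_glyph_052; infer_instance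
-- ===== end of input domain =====

-- B replaces A's inner scan over all sorted keys at each position by a per-length
-- hash lookup of the substring (longest length first) — same result, no key scan.

-- ===== PORT A =====
-- sym = dict(pairs); for k, v in list(sym.items()): if sym.get(v) != k: sym[v] = k
def pvSymA (pairs : List (String × String)) : PySem.Dict String String :=
  let sym := PySem.Dict.ofList pairs
  sym.items.foldl (fun s kv => if s.get? kv.2 ≠ some kv.1 then s.insert kv.2 kv.1 else s) sym

-- the inner `for k in keys: if k and out.startswith(k, i): … break` first-match search
def pvFindKey (cs : List Char) (keys : List String) : Option String :=
  keys.find? (fun k => !(k == "") && PySem.Chars.startswith cs k.toList)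

theorem pvFindKey_length_pos {cs : List Char} {keys : List String} {k : String}
    (h : pvFindKey cs keys = some k) : 1 ≤ k.toList.length := by
  have hp := List.find?_some h
  simp only [Bool.and_eq_true, Bool.not_eq_true', beq_eq_false_iff_ne] at hp
  rcases hp with ⟨hne, _⟩
  cases hk : k.toList with
  | nil =>
    exact absurd (by simpa using congrArg String.ofList hk) hne
  | cons a l => simp

-- the `while i < len(out)` loop: buf is the concatenation of the appended pieces
def pvScanA (sym : PySem.Dict String String) (keys : List String) : List Char → List Char
  | [] => []
  | c :: rs =>
    match h : pvFindKey (c :: rs) keys with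
    | some k => (sym.getD k "").toList ++ pvScanA sym keys ((c :: rs).drop k.toList.length)
    | none => (sym.getD (String.ofList [c]) (String.ofList [c])).toList ++ pvScanA sym keys rs
termination_by cs => cs.length
decreasing_by
  · have := pvFindKey_length_pos h
    simp only [List.length_drop, List.length_cons]
    omega
  · simp

def pvApplyA (cs : List Char) (pairs : List (String × String)) : List Char :=
  let sym := pvSymA pairs
  let keys := PySem.List.sorted sym.keys (fun k => k.toList.length) true
  pvScanA sym keys cs

def glyph_052 (text : String) (rules : List (List (String × String))) : String :=
  String.ofList (rules.foldl pvApplyA text.toList)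

-- ===== PORT B =====
-- identical symmetrisation step (B's Python repeats these two lines verbatim)
def pvSymB (pairs : List (String × String)) : PySem.Dict String String :=
  let sym := PySem.Dict.ofList pairs
  sym.items.foldl (fun s kv => if s.get? kv.2 ≠ some kv.1 then s.insert kv.2 kv.1 else s) sym

-- maxlen = max(map(len, sym), default=0)
def pvMaxLen (sym : PySem.Dict String String) : Nat :=
  sym.keys.foldl (fun m k => max m k.toList.length) 0

-- the inner `while L > 0: v = sym.get(out[i:i+L]); …; L -= 1` loop
def pvLook (sym : PySem.Dict String String) (cs : List Char) : Nat → Option (String × Nat)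
  | 0 => none
  | L + 1 =>
    match sym.get? (String.ofList (cs.take (L + 1))) with
    | some v => some (v, L + 1)
    | none => pvLook sym cs L

theorem pvLook_some_pos {sym : PySem.Dict String String} {cs : List Char} {M L : Nat} {v : String}
    (h : pvLook sym cs M = some (v, L)) : 1 ≤ L := by
  induction M with
  | zero => simp [pvLook] at h
  | succ M ih =>
    simp only [pvLook] at h
    cases hg : sym.get? (String.ofList (cs.take (M + 1))) with
    | some w => rw [hg] at h; simp at h; omega
    | none => rw [hg] at h; exact ih h

-- the outer `while i < n` loop of B
def pvScanB (sym : PySem.Dict String String) (maxlen : Nat) : List Char → List Char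
  | [] => []
  | c :: rs =>
    match h : pvLook sym (c :: rs) (min maxlen (rs.length + 1)) with
    | some vL => vL.1.toList ++ pvScanB sym maxlen ((c :: rs).drop vL.2)
    | none => c :: pvScanB sym maxlen rs
termination_by cs => cs.length
decreasing_by
  · have := pvLook_some_pos h
    simp only [List.length_drop, List.length_cons]
    omega
  · simp

def pvApplyB (cs : List Char) (pairs : List (String × String)) : List Char :=
  let sym := pvSymB pairs
  pvScanB sym (pvMaxLen sym) cs

def glyph_052_alt (text : String) (rules : List (List (String × String))) : String :=
  String.ofList (rules.foldl pvApplyB text.toList)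

-- ===== PRECONDITION & SPEC =====
def Spec_glyph_052 (text : String) (rules : List (List (String × String))) (out : String) : Prop := out = glyph_052_alt text rules
instance (text : String) (rules : List (List (String × String))) (out : String) : Decidable (Spec_glyph_052 text rules out) := by unfold Spec_glyph_052; infer_instance

-- ===== CLAIM (what is proved, stated in full; the proofs are below) =====
def Claim_equal_glyph_052 : Prop := ∀ (text : String) (rules : List (List (String × String))), Dom_glyph_052 text rules → Spec_glyph_052 text rules (glyph_052 text rules)

-- ===== LEMMAS AND PROOFS =====

theorem pvSymB_eq_pvSymA (pairs : List (String × String)) : pvSymB pairs = pvSymA pairs := rfl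

theorem pvFoldMax_init {α : Type} (f : α → Nat) (l : List α) (i j : Nat) (h : i ≤ j) :
    i ≤ l.foldl (fun m k => max m (f k)) j := by
  induction l generalizing j with
  | nil => simpa using h
  | cons b t ih => exact ih _ (le_trans h (le_max_left _ _))

theorem pvFoldMax_le {α : Type} (f : α → Nat) (l : List α) (init : Nat) {x : α} (hx : x ∈ l) :
    f x ≤ l.foldl (fun m k => max m (f k)) init := by
  induction l generalizing init with
  | nil => cases hx
  | cons a t ih =>
    rcases List.mem_cons.mp hx with rfl | hx'
    · exact pvFoldMax_init f t _ _ (le_max_right _ _)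
    · exact ih _ hx'

theorem mem_le_pvMaxLen {sym : PySem.Dict String String} {k : String} (hk : k ∈ sym.keys) :
    k.toList.length ≤ pvMaxLen sym := by
  unfold pvMaxLen
  exact pvFoldMax_le (fun k => k.toList.length) _ 0 hk

theorem pvLook_eq_none_iff {sym : PySem.Dict String String} {cs : List Char} {M : Nat} :
    pvLook sym cs M = none ↔ ∀ L, 1 ≤ L → L ≤ M → sym.get? (String.ofList (cs.take L)) = none := by
  induction M with
  | zero =>
    constructor
    · intro _ L h1 h2
      exact absurd (h1.trans h2) (by omega)
    · intro _
      rfl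
  | succ M ih =>
    simp only [pvLook]
    cases hg : sym.get? (String.ofList (cs.take (M + 1))) with
    | some v =>
      simp only [reduceCtorEq, false_iff]
      intro hall
      exact absurd (hall (M + 1) (by omega) le_rfl) (by simp [hg])
    | none =>
      simp only [ih]
      constructor
      · intro hall L h1 h2
        rcases Nat.lt_or_ge L (M + 1) with h | h
        · exact hall L h1 (by omega)
        · have : L = M + 1 := by omega
          subst this; exact hg
      · intro hall L h1 h2; exact hall L h1 (by omega)

theorem pvLook_eq_some_of {sym : PySem.Dict String String} {cs : List Char} {M L : Nat} {v : String}
    (h1 : 1 ≤ L) (h2 : L ≤ M) (hg : sym.get? (String.ofList (cs.take L)) = some v)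
    (hmax : ∀ L', L < L' → L' ≤ M → sym.get? (String.ofList (cs.take L')) = none) :
    pvLook sym cs M = some (v, L) := by
  induction M with
  | zero => omega
  | succ M ih =>
    simp only [pvLook]
    rcases Nat.lt_or_ge L (M + 1) with h | h
    · rw [hmax (M + 1) h le_rfl]
      exact ih (by omega) (fun L' hL' h2' => hmax L' hL' (by omega))
    · have : L = M + 1 := by omega
      subst this
      rw [hg]

-- every string looked up successfully at some length is a nonempty key matching as a prefix
theorem pvKey_of_get?_some {pairs : List (String × String)} {cs : List Char} {L : Nat} {v : String}
    (h1 : 1 ≤ L) (h2 : L ≤ cs.length)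
    (hg : (pvSymA pairs).get? (String.ofList (cs.take L)) = some v) :
    ∃ k, k ∈ (pvSymA pairs).keys ∧ k.toList = cs.take L ∧ k.toList.length = L ∧
      (!(k == "") && PySem.Chars.startswith cs k.toList) = true := by
  refine ⟨String.ofList (cs.take L), ?_, by simp, by simp [h2], ?_⟩
  · by_contra hmem
    rw [(PySem.Dict.get?_eq_none_iff_not_mem_keys _ _).mpr hmem] at hg
    exact absurd hg (by simp)
  · have hlen : (cs.take L).length = L := by simp [h2]
    have hne : String.ofList (cs.take L) ≠ "" := by
      intro he
      have : (cs.take L) = ([] : List Char) := by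
        have := congrArg String.toList he
        simpa using this
      rw [this] at hlen
      simp at hlen
      omega
    simp only [Bool.and_eq_true, Bool.not_eq_true', beq_eq_false_iff_ne, ne_eq]
    exact ⟨hne, by rw [PySem.Chars.startswith_iff]; simpa using List.take_prefix L cs⟩

-- if A's key scan finds nothing, no length looks up successfully
theorem pvNoMatch_get?_none {pairs : List (String × String)} {cs : List Char}
    (h : pvFindKey cs (PySem.List.sorted (pvSymA pairs).keys (fun k => k.toList.length) true) = none) :
    ∀ L, 1 ≤ L → L ≤ cs.length → (pvSymA pairs).get? (String.ofList (cs.take L)) = none := by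
  intro L h1 h2
  by_contra hne
  cases hg : (pvSymA pairs).get? (String.ofList (cs.take L)) with
  | none => exact hne hg
  | some v =>
    obtain ⟨k, hkmem, _, _, hp⟩ := pvKey_of_get?_some h1 h2 hg
    have hmemS : k ∈ PySem.List.sorted (pvSymA pairs).keys (fun k => k.toList.length) true :=
      (PySem.List.mem_sorted _ _ _ _).mpr hkmem
    have := List.find?_eq_none.mp h k hmemS
    rw [hp] at this
    exact absurd this (by simp)

-- if A's key scan finds k, B's descending-length lookup loop finds exactly (sym[k], len(k))
theorem pvMatch_look {pairs : List (String × String)} {cs : List Char} {k : String}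
    (h : pvFindKey cs (PySem.List.sorted (pvSymA pairs).keys (fun k => k.toList.length) true) = some k) :
    pvLook (pvSymA pairs) cs (min (pvMaxLen (pvSymA pairs)) cs.length) =
      some ((pvSymA pairs).getD k "", k.toList.length) := by
  have hp := List.find?_some h
  simp only [Bool.and_eq_true, Bool.not_eq_true', beq_eq_false_iff_ne, ne_eq] at hp
  rcases hp with ⟨hne, hsw⟩
  have hpre : k.toList <+: cs := (PySem.Chars.startswith_iff _ _).mp hsw
  have hL1 : 1 ≤ k.toList.length := pvFindKey_length_pos h
  have hLcs : k.toList.length ≤ cs.length := hpre.length_le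
  have hkmem : k ∈ (pvSymA pairs).keys := by
    have := List.mem_of_find?_eq_some h
    exact (PySem.List.mem_sorted _ _ _ _).mp this
  have hLmax : k.toList.length ≤ pvMaxLen (pvSymA pairs) := mem_le_pvMaxLen hkmem
  have htake : cs.take k.toList.length = k.toList := (List.prefix_iff_eq_take.mp hpre).symm
  have hgk : ∃ v, (pvSymA pairs).get? k = some v := by
    cases hg : (pvSymA pairs).get? k with
    | some v => exact ⟨v, rfl⟩
    | none => exact absurd hkmem ((PySem.Dict.get?_eq_none_iff_not_mem_keys _ _).mp hg)
  obtain ⟨v, hv⟩ := hgk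
  have hgtake : (pvSymA pairs).get? (String.ofList (cs.take k.toList.length)) = some v := by
    rw [htake]; simpa using hv
  have hgetD : (pvSymA pairs).getD k "" = v := PySem.Dict.getD_of_get?_eq_some _ "" hv
  rw [hgetD]
  apply pvLook_eq_some_of hL1 (by omega) hgtake
  -- maximality: no strictly longer length can look up successfully
  intro L' hgt hle
  by_contra hne'
  cases hg' : (pvSymA pairs).get? (String.ofList (cs.take L')) with
  | none => exact hne' hg'
  | some v' =>
    obtain ⟨k', hk'mem, _, hk'len, hp'⟩ := pvKey_of_get?_some (by omega) (by omega) hg'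
    -- k' satisfies the predicate and is in the sorted list; find? returned k first,
    -- and every element at or after k in the length-descending order is no longer than k
    obtain ⟨as, bs, hsplit, hbefore⟩ := List.find?_eq_some_iff_append.mp h |>.2
    have hk'memS : k' ∈ PySem.List.sorted (pvSymA pairs).keys (fun k => k.toList.length) true :=
      (PySem.List.mem_sorted _ _ _ _).mpr hk'mem
    have hpw : (PySem.List.sorted (pvSymA pairs).keys (fun k => k.toList.length) true).Pairwise
        (fun a b => b.toList.length ≤ a.toList.length) := PySem.List.sorted_pairwise_rev _ _
    rw [hsplit] at hk'memS hpw
    rcases List.mem_append.mp hk'memS with hin | hin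
    · have := hbefore k' hin
      rw [hp'] at this; exact absurd this (by simp)
    · rcases List.mem_cons.mp hin with rfl | hin'
      · omega
      · have hrel := (List.pairwise_append.mp hpw).2.1
        have := (List.pairwise_cons.mp hrel).1 k' hin'
        omega

theorem pvScan_eq (pairs : List (String × String)) : ∀ cs : List Char,
    pvScanA (pvSymA pairs) (PySem.List.sorted (pvSymA pairs).keys (fun k => k.toList.length) true) cs
      = pvScanB (pvSymA pairs) (pvMaxLen (pvSymA pairs)) cs := by
  intro cs
  induction hn : cs.length using Nat.strong_induction_on generalizing cs with
  | _ n ih =>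
  cases cs with
  | nil => rw [pvScanA, pvScanB]
  | cons c rs =>
    rw [pvScanA, pvScanB]
    cases hf : pvFindKey (c :: rs)
        (PySem.List.sorted (pvSymA pairs).keys (fun k => k.toList.length) true) with
    | some k =>
      have hlook := pvMatch_look hf
      simp only [List.length_cons] at hlook
      have hL1 : 1 ≤ k.toList.length := pvFindKey_length_pos hf
      split
      · next vL heq =>
        obtain rfl : k = vL := Option.some.inj heq
        split
        · next vL' heq2 =>
          rw [hlook] at heq2
          obtain rfl : ((pvSymA pairs).getD k "", k.toList.length) = vL' := Option.some.inj heq2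
          congr 1
          refine ih ((( c :: rs).drop k.toList.length).length) ?_ _ rfl
          simp only [List.length_drop, List.length_cons, ← hn]
          omega
        · next heq2 =>
          rw [hlook] at heq2
          cases heq2
      · next heq =>
        cases heq
    | none =>
      have hnone : pvLook (pvSymA pairs) (c :: rs) (min (pvMaxLen (pvSymA pairs)) (rs.length + 1)) = none := by
        rw [pvLook_eq_none_iff]
        intro L h1 h2
        refine pvNoMatch_get?_none hf L h1 ?_
        simp only [List.length_cons]
        omega
      have hc : (pvSymA pairs).get? (String.ofList [c]) = none := by
        have := pvNoMatch_get?_none hf 1 le_rfl (by simp)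
        simpa using this
      simp only [PySem.Dict.getD_of_get?_eq_none _ _ hc]
      simp only [String.toList_ofList, List.singleton_append]
      split
      · next vL heq =>
        rw [hnone] at heq
        cases heq
      · next heq =>
        congr 1
        refine ih rs.length ?_ _ rfl
        simp only [← hn, List.length_cons]
        omega

theorem pvApply_eq (cs : List Char) (pairs : List (String × String)) :
    pvApplyA cs pairs = pvApplyB cs pairs := by
  unfold pvApplyA pvApplyB
  rw [pvSymB_eq_pvSymA]
  exact pvScan_eq pairs cs

theorem pvFold_eq (rules : List (List (String × String))) : ∀ cs : List Char,
    rules.foldl pvApplyA cs = rules.foldl pvApplyB cs := by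
  induction rules with
  | nil => intro cs; rfl
  | cons pairs t ih =>
    intro cs
    simp only [List.foldl_cons, pvApply_eq, ih]

-- ===== VERDICT (by name: the statement is the Claim_ definition above) =====
theorem glyph_052_spec : Claim_equal_glyph_052 := by
  intro text rules _
  unfold Spec_glyph_052 glyph_052 glyph_052_alt
  rw [pvFold_eq]
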